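-- pv_equiv track=rewrite | github.com/Arkleseisure/old-chess-bot | Bits_and_Pieces.py | find_pieces
-- ===== SOURCE A (Python) =====
-- def find_pieces(board):
--     squares = {"Pw": [], "Pb": [], "Bw": [], "Bb": [], "Nw": [], "Nb": [], "Rw": [], "Rb": [], "Qw": [], "Qb": [],
--                "Kw": [], "Kb": []}
--     for col in range(len(board)):
--         for row in range(len(board)):
--             if board[col][row] != " ":
--                 squares[board[col][row]].append([col, row])
--     return squares
-- ===== SOURCE B (Python) =====
-- PIECE_CODES = ["Pw", "Pb", "Bw", "Bb", "Nw", "Nb", "Rw", "Rb", "Qw", "Qb", "Kw", "Kb"]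
--
--
-- def find_pieces(board):
--     n = len(board)
--     return {p: [[col, row] for col in range(n) for row in range(n)
--                 if board[col][row] == p]
--             for p in PIECE_CODES}
-- ===== Notes on version B (the rewrite author's own statement) =====
-- stated objective: idiomatic
-- what changed: A makes one pass over the board dispatching each occupied square into a pre-built dict via mutation; B is a dict comprehension that, for each of the 12 fixed piece codes, scans the board collecting its [col,row] positions directly.
import Mathlib
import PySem

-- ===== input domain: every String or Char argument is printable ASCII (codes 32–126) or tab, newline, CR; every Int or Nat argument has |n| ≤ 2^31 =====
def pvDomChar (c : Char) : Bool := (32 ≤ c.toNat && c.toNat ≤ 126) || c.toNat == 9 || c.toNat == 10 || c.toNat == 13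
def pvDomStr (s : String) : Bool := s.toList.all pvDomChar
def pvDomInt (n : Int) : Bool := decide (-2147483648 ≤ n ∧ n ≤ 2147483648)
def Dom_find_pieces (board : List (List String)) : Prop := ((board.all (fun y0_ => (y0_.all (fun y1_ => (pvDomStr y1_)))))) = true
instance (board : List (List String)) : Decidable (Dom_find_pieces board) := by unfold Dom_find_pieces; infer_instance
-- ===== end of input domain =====

-- B replaces A's single mutating dict-dispatch pass by a per-piece-code dict comprehension (idiomatic, same asymptotic cost).


-- the 12 piece codes (B's PIECE_CODES constant)
def pieceCodes : List String :=
  ["Pw", "Pb", "Bw", "Bb", "Nw", "Nb", "Rw", "Rb", "Qw", "Qb", "Kw", "Kb"]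

-- ===== PORT A =====
def find_pieces (board : List (List String)) : List (String × List (List Int)) :=
  let squares : PySem.Dict String (List (List Int)) :=
    PySem.Dict.ofList [("Pw", []), ("Pb", []), ("Bw", []), ("Bb", []), ("Nw", []), ("Nb", []),
                       ("Rw", []), ("Rb", []), ("Qw", []), ("Qb", []), ("Kw", []), ("Kb", [])]
  let squares :=
    (PySem.List.pyRange 0 (PySem.List.len board) 1).foldl (fun d col =>
      (PySem.List.pyRange 0 (PySem.List.len board) 1).foldl (fun d row =>
        match PySem.List.pyGet? (PySem.List.pyGetD board col []) row with
        | none => d          -- IndexError: outside Pre_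
        | some s => if s ≠ " " then d.modify s [] (· ++ [[col, row]]) else d) d) squares
        -- squares[s].append(...): KeyError for s ∉ pieceCodes is outside Pre_
  squares.items

-- ===== PORT B =====
def find_pieces_alt (board : List (List String)) : List (String × List (List Int)) :=
  pieceCodes.map (fun p => (p,
    (PySem.List.pyRange 0 (PySem.List.len board) 1).flatMap (fun col =>
      (PySem.List.pyRange 0 (PySem.List.len board) 1).filterMap (fun row =>
        match PySem.List.pyGet? (PySem.List.pyGetD board col []) row with
        | none => none       -- IndexError: outside Pre_
        | some s => if s = p then some [col, row] else none))))

-- ===== PRECONDITION & SPEC =====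
-- Pre_ excludes exactly the inputs where A raises: a row shorter than the board (IndexError)
-- or a scanned entry that is neither " " nor one of the 12 piece codes (KeyError).
def Pre_find_pieces (board : List (List String)) : Prop :=
  (∀ r ∈ board, board.length ≤ r.length) ∧
  (∀ r ∈ board, ∀ s ∈ r.take board.length, s = " " ∨ s ∈ pieceCodes)
instance (board : List (List String)) : Decidable (Pre_find_pieces board) := by
  unfold Pre_find_pieces; infer_instance

def pvWitness_find_pieces : List (List String) := [[" ", "Pw"], ["Kb", " "]]

def Spec_find_pieces (board : List (List String)) (out : List (String × List (List Int))) : Prop :=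
  out = find_pieces_alt board
instance (board : List (List String)) (out : List (String × List (List Int))) :
    Decidable (Spec_find_pieces board out) := by unfold Spec_find_pieces; infer_instance

-- ===== CLAIM (what is proved, stated in full; the proofs are below) =====
def Claim_equal_find_pieces : Prop :=
  ∀ (board : List (List String)), Dom_find_pieces board → Pre_find_pieces board →
    Spec_find_pieces board (find_pieces board)

-- ===== LEMMAS AND PROOFS =====

-- all (col, row) pairs in A's traversal order
def pvPairs (board : List (List String)) : List (Int × Int) :=
  (PySem.List.pyRange 0 (PySem.List.len board) 1).flatMap (fun col =>
    (PySem.List.pyRange 0 (PySem.List.len board) 1).map (fun row => (col, row)))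

-- the occupied squares, in traversal order, as (piece code, [col, row]) pairs
def pvCells (board : List (List String)) : List (String × List Int) :=
  (pvPairs board).filterMap (fun p =>
    match PySem.List.pyGet? (PySem.List.pyGetD board p.1 []) p.2 with
    | none => none
    | some s => if s ≠ " " then some (s, [p.1, p.2]) else none)

theorem pv_foldl_nested {α : Type} (R1 R2 : List Int) (g : α → Int → Int → α) (d : α) :
    R1.foldl (fun d c => R2.foldl (fun d r => g d c r) d) d
      = (R1.flatMap (fun c => R2.map (fun r => (c, r)))).foldl (fun d p => g d p.1 p.2) d := by
  induction R1 generalizing d with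
  | nil => rfl
  | cons c t ih => simp [List.flatMap_cons, List.foldl_append, List.foldl_map, ih]

theorem pv_foldl_branch (board : List (List String)) (L : List (Int × Int))
    (d : PySem.Dict String (List (List Int))) :
    L.foldl (fun d p =>
        match PySem.List.pyGet? (PySem.List.pyGetD board p.1 []) p.2 with
        | none => d
        | some s => if s ≠ " " then d.modify s [] (· ++ [[p.1, p.2]]) else d) d
      = (L.filterMap (fun p =>
          match PySem.List.pyGet? (PySem.List.pyGetD board p.1 []) p.2 with
          | none => none
          | some s => if s ≠ " " then some (s, [p.1, p.2]) else none)).foldl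
          (fun d q => d.modify q.1 [] (· ++ [q.2])) d := by
  induction L generalizing d with
  | nil => rfl
  | cons p t ih =>
    rw [List.foldl_cons, List.filterMap_cons]
    cases hv : PySem.List.pyGet? (PySem.List.pyGetD board p.1 []) p.2 with
    | none => exact ih d
    | some s =>
      by_cases hs : s ≠ " "
      · simp only [if_pos hs]; exact ih _
      · simp only [if_neg hs]; exact ih d

theorem pv_find_pieces_eq (board : List (List String)) :
    find_pieces board
      = ((pvCells board).foldl (fun d q => d.modify q.1 [] (· ++ [q.2]))
          (PySem.Dict.ofList [("Pw", []), ("Pb", []), ("Bw", []), ("Bb", []), ("Nw", []), ("Nb", []),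
                              ("Rw", []), ("Rb", []), ("Qw", []), ("Qb", []), ("Kw", []), ("Kb", [])])).items := by
  unfold pvCells pvPairs
  simp only [find_pieces]
  rw [pv_foldl_nested, pv_foldl_branch]

theorem pv_mem_pairs (board : List (List String)) (p : Int × Int) (hp : p ∈ pvPairs board) :
    0 ≤ p.1 ∧ p.1 < (board.length : Int) ∧ 0 ≤ p.2 ∧ p.2 < (board.length : Int) := by
  unfold pvPairs at hp
  simp only [List.mem_flatMap, List.mem_map] at hp
  obtain ⟨c, hc, r, hr, rfl⟩ := hp
  rw [PySem.List.mem_pyRange_one] at hc hr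
  simp [PySem.List.len] at hc hr ⊢
  omega

-- under Pre_, every cell key is one of the 12 piece codes
theorem pv_cells_keys (board : List (List String)) (hpre : Pre_find_pieces board)
    (q : String × List Int) (hq : q ∈ pvCells board) : q.1 ∈ pieceCodes := by
  unfold pvCells at hq
  rw [List.mem_filterMap] at hq
  obtain ⟨p, hp, hfp⟩ := hq
  obtain ⟨h1, h2, h3, h4⟩ := pv_mem_pairs board p hp
  cases hv : PySem.List.pyGet? (PySem.List.pyGetD board p.1 []) p.2 with
  | none => rw [hv] at hfp; simp at hfp
  | some s =>
    rw [hv] at hfp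
    dsimp only at hfp
    by_cases hs : s = " "
    · rw [if_neg (by simp [hs])] at hfp; simp at hfp
    · rw [if_pos hs] at hfp
      injection hfp with hfp
      rw [← hfp]
      -- locate s on the board
      rw [PySem.List.pyGetD_eq_getElem board [] h1 (by simpa using h2)] at hv
      set r := board[p.1.toNat]'(by omega) with hr
      have hrmem : r ∈ board := by rw [hr]; exact List.getElem_mem _
      have hlen : (board.length : Int) ≤ (r.length : Int) := by
        exact_mod_cast hpre.1 r hrmem
      rw [PySem.List.pyGet?_eq_some_getElem r h3 (by exact lt_of_lt_of_le h4 hlen)] at hv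
      have hsv : s = r[p.2.toNat]'(by omega) := by injection hv with h; exact h.symm
      have hmem : s ∈ r.take board.length := by
        rw [hsv]
        have hlt : p.2.toNat < (r.take board.length).length := by
          simp [List.length_take]; omega
        have : (r.take board.length)[p.2.toNat]'hlt = r[p.2.toNat]'(by omega) := by
          simp [List.getElem_take]
        rw [← this]
        exact List.getElem_mem _
      rcases hpre.2 r hrmem s hmem with h | h
      · exact absurd h hs
      · exact h

theorem pv_filterMap_flatMap_map {α β γ δ : Type} (A : List α) (B : List β)
    (m : α → β → γ) (F : γ → Option δ) (G : α → β → Option δ)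
    (h : ∀ a b, F (m a b) = G a b) :
    (A.flatMap (fun a => B.map (m a))).filterMap F = A.flatMap (fun a => B.filterMap (G a)) := by
  induction A with
  | nil => rfl
  | cons a t ih =>
    simp only [List.flatMap_cons, List.filterMap_append, List.filterMap_map, ih]
    congr 1
    exact List.filterMap_congr (fun b _ => h a b)

-- B's per-code scan equals filtering the cell list by that code
theorem pv_bpos_eq (board : List (List String)) (p : String) (hp : p ≠ " ") :
    ((pvCells board).filter (fun q => q.1 == p)).map (·.2)
      = (PySem.List.pyRange 0 (PySem.List.len board) 1).flatMap (fun col =>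
          (PySem.List.pyRange 0 (PySem.List.len board) 1).filterMap (fun row =>
            match PySem.List.pyGet? (PySem.List.pyGetD board col []) row with
            | none => none
            | some s => if s = p then some [col, row] else none)) := by
  unfold pvCells pvPairs
  rw [List.filter_filterMap, List.map_filterMap]
  apply pv_filterMap_flatMap_map
  intro c r
  dsimp only
  cases hv : PySem.List.pyGet? (PySem.List.pyGetD board c []) r with
  | none => rfl
  | some s =>
    by_cases hs : s = " "
    · subst hs
      simp [Ne.symm hp]
    · by_cases hsp : s = p
      · subst hsp; simp [hs, Option.filter]
      · simp [hs, hsp, Option.filter]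

-- ===== VERDICT (by name: the statement is the Claim_ definition above) =====
theorem find_pieces_spec : Claim_equal_find_pieces := by
  intro board _ hpre
  unfold Spec_find_pieces find_pieces_alt
  rw [pv_find_pieces_eq]
  set d0 : PySem.Dict String (List (List Int)) :=
    PySem.Dict.ofList [("Pw", []), ("Pb", []), ("Bw", []), ("Bb", []), ("Nw", []), ("Nb", []),
                       ("Rw", []), ("Rb", []), ("Qw", []), ("Qb", []), ("Kw", []), ("Kb", [])] with hd0
  have hkeys0 : d0.keys = pieceCodes := by rw [hd0]; decide
  have hnd0 : d0.keys.Nodup := by rw [hkeys0]; decide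
  set dfin := (pvCells board).foldl (fun d q => d.modify q.1 [] (· ++ [q.2])) d0 with hdfin
  have hndfin : dfin.keys.Nodup :=
    PySem.Dict.nodup_keys_foldl_modify_key (pvCells board) Prod.fst []
      (fun _ q => (· ++ [q.2])) d0 hnd0
  have hkeysfin : dfin.keys = pieceCodes := by
    rw [hdfin]
    have := PySem.Dict.keys_foldl_modify_key (l := pvCells board) (key := Prod.fst)
      (d0 := ([] : List (List Int))) (f := fun _ q => (· ++ [q.2])) (d := d0)
    rw [this, hkeys0, PySem.Set.update_eq_append_filter]
    have hnil : (PySem.Set.ofList ((pvCells board).map Prod.fst)).filter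
        (fun y => !(PySem.Set.contains pieceCodes y)) = [] := by
      rw [List.filter_eq_nil_iff]
      intro x hx
      rw [PySem.Set.mem_ofList] at hx
      rw [List.mem_map] at hx
      obtain ⟨q, hq, rfl⟩ := hx
      simp
      exact pv_cells_keys board hpre q hq
    rw [hnil, List.append_nil]
  have hgetD : ∀ k : String, dfin.getD k [] =
      d0.getD k [] ++ ((pvCells board).filter (fun q => q.1 == k)).map (·.2) := by
    intro k
    rw [hdfin, PySem.Dict.getD_foldl_modify_append]
  rw [PySem.Dict.items_eq_map_keys dfin hndfin [], hkeysfin]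
  apply List.map_congr_left
  intro p hpmem
  have hpfacts : p ≠ " " ∧ d0.getD p [] = [] := by
    rw [hd0]
    simp only [pieceCodes, List.mem_cons, List.not_mem_nil, or_false] at hpmem
    rcases hpmem with rfl | rfl | rfl | rfl | rfl | rfl | rfl | rfl | rfl | rfl | rfl | rfl <;>
      exact ⟨by decide, by decide⟩
  rw [hgetD p, hpfacts.2, List.nil_append, pv_bpos_eq board p hpfacts.1]
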